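-- pv_equiv track=rewrite | github.com/tiagoleonmelo/ia | ex2.py | element_counter
-- ===== SOURCE A (Python) =====
-- def element_counter(l):
--     if l == []:
--         return []
--
--     rec = element_counter(l[1:])
--
--     if exists(rec,l[0]):
--         idx = idx_finder(rec,l[0])
--         tpl = rec.pop(idx)
--         rec.append((tpl[0],tpl[1]+1))
--     else:
--         rec.append((l[0],1))
--
--     return rec
--
-- def exists(l, x):
--     if l == []:
--         return False
--
--     if l[0][0] == x:
--         return True
--
--     return exists(l[1:], x)
--
-- def idx_finder(l, x):
--     if l[0][0] == x:
--         return 0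
--
--     return 1 + idx_finder(l[1:], x)
-- ===== SOURCE B (Python) =====
-- def element_counter(l):
--     counts = {}
--     for x in l:
--         counts[x] = counts.get(x, 0) + 1
--     return [(k, v) for k, v in reversed(list(counts.items()))]
-- ===== Notes on version B (the rewrite author's own statement) =====
-- stated objective: faster
-- what changed: Replaced the quadratic recursion with linear exists/idx_finder/pop scans and move-to-end reordering by a single forward counting pass into an insertion-ordered dict, emitted in reverse.
import Mathlib
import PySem

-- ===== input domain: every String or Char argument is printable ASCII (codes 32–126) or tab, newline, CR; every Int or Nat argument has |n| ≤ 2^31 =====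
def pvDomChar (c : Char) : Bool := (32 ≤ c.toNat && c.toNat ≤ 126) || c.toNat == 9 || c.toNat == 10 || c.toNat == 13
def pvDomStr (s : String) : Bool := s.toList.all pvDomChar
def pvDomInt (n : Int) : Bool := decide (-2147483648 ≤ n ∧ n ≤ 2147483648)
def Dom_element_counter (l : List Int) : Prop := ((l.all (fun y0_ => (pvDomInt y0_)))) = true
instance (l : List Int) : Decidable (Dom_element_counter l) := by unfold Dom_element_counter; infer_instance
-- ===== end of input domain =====

-- B replaces A's quadratic tail-recursion (with linear exists/idx_finder/pop scans) by one
-- forward counting pass into an insertion-ordered dict, emitted in reverse; asymptotically faster.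

-- ===== PORT A =====
-- Python helper `exists`
def pvExistsA (l : List (Int × Int)) (x : Int) : Bool :=
  match l with
  | [] => false
  | t :: rest => if t.1 = x then true else pvExistsA rest x

-- Python helper `idx_finder`; on [] Python raises IndexError, but A only calls it when
-- `exists` holds, so that branch is unreachable (the 0 is a placeholder, never used).
def pvIdxFinderA (l : List (Int × Int)) (x : Int) : Int :=
  match l with
  | [] => 0
  | t :: rest => if t.1 = x then 0 else 1 + pvIdxFinderA rest x

def element_counter (l : List Int) : List (Int × Int) :=
  match l with
  | [] => []
  | x :: tl =>
    let r := element_counter tl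
    if pvExistsA r x then
      -- tpl = rec.pop(idx); rec.append((tpl[0], tpl[1]+1)); pop? never fails here
      match PySem.List.pop? r (pvIdxFinderA r x) with
      | some (tpl, rest) => rest ++ [(tpl.1, tpl.2 + 1)]
      | none => []
    else r ++ [(x, 1)]

-- ===== PORT B =====
def element_counter_alt (l : List Int) : List (Int × Int) :=
  ((l.foldl (fun d x => d.insert x (d.getD x 0 + 1)) PySem.Dict.empty).items).reverse

-- ===== PRECONDITION & SPEC =====
def Spec_element_counter (l : List Int) (out : List (Int × Int)) : Prop := out = element_counter_alt l
instance (l : List Int) (out : List (Int × Int)) : Decidable (Spec_element_counter l out) := by unfold Spec_element_counter; infer_instance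

-- ===== CLAIM (what is proved, stated in full; the proofs are below) =====
def Claim_equal_element_counter : Prop := ∀ (l : List Int), Dom_element_counter l → Spec_element_counter l (element_counter l)

-- ===== LEMMAS AND PROOFS =====

-- canonical form: distinct elements in first-occurrence order, each with its total count
def pvF (l : List Int) : List (Int × Int) :=
  (PySem.Set.ofList l).map (fun k => (k, (l.count k : Int)))

-- first value stored under key x (0 if absent)
def pvGetV (x : Int) (a : List (Int × Int)) : Int :=
  match a with
  | [] => 0
  | (k, v) :: t => if k = x then v else pvGetV x t

-- erase the first entry with key x
def pvEraseK (x : Int) (a : List (Int × Int)) : List (Int × Int) :=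
  match a with
  | [] => []
  | (k, v) :: t => if k = x then t else (k, v) :: pvEraseK x t

theorem pvExistsA_eq_mem (a : List (Int × Int)) (x : Int) :
    pvExistsA a x = true ↔ x ∈ a.map Prod.fst := by
  induction a with
  | nil => simp [pvExistsA]
  | cons t rest ih =>
    by_cases hk : t.1 = x
    · simp [pvExistsA, hk]
    · simp only [pvExistsA, if_neg hk, List.map_cons, List.mem_cons, ih]
      constructor
      · exact Or.inr
      · rintro (h | h)
        · exact absurd h.symm hk
        · exact h

theorem pvIdxFinderA_nonneg (a : List (Int × Int)) (x : Int) : 0 ≤ pvIdxFinderA a x := by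
  induction a with
  | nil => simp [pvIdxFinderA]
  | cons t rest ih =>
    simp only [pvIdxFinderA]
    split
    · omega
    · omega

theorem pop_cons_succ (p : Int × Int) (t : List (Int × Int)) (i : Int) (hi : 0 ≤ i) :
    PySem.List.pop? (p :: t) (1 + i) = (PySem.List.pop? t i).map (fun r => (r.1, p :: r.2)) := by
  simp only [PySem.List.pop?, PySem.List.pyIdx?]
  by_cases h2 : i < (t.length : Int)
  · have h1 : (1 : Int) + i < ((p :: t).length : Int) := by simp; omega
    have h0 : 0 ≤ (1 : Int) + i := by omega
    have h3 : ((1 : Int) + i).toNat = i.toNat + 1 := by omega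
    simp only [if_pos h0, if_pos h1, if_pos hi, if_pos h2, h3]
    rcases ht : t[i.toNat]? with _ | y
    · simp [ht]
    · simp [ht]
  · have h1 : ¬ ((1 : Int) + i < ((t.length : Int) + 1)) := by omega
    have h0 : 0 ≤ (1 : Int) + i := by omega
    simp only [List.length_cons, Nat.cast_add, Nat.cast_one, if_pos h0, if_neg h1, if_pos hi,
      if_neg h2]
    rfl

theorem pop_lemma (a : List (Int × Int)) (x : Int) (h : pvExistsA a x = true) :
    PySem.List.pop? a (pvIdxFinderA a x) = some ((x, pvGetV x a), pvEraseK x a) := by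
  induction a with
  | nil => simp [pvExistsA] at h
  | cons t rest ih =>
    obtain ⟨k, v⟩ := t
    by_cases hk : k = x
    · subst hk
      simp [pvIdxFinderA, pvGetV, pvEraseK, PySem.List.pop?_zero_cons]
    · have h' : pvExistsA rest x = true := by simpa [pvExistsA, hk] using h
      simp only [pvIdxFinderA, pvGetV, pvEraseK, if_neg hk]
      rw [pop_cons_succ _ _ _ (pvIdxFinderA_nonneg rest x), ih h']
      simp

theorem pvGetV_not_mem (a : List (Int × Int)) (x : Int) (h : x ∉ a.map Prod.fst) :
    pvGetV x a = 0 := by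
  induction a with
  | nil => simp [pvGetV]
  | cons t rest ih =>
    obtain ⟨k, v⟩ := t
    simp only [List.map_cons, List.mem_cons] at h
    rw [not_or] at h
    simp only [pvGetV]
    rw [if_neg (fun hkx => h.1 hkx.symm)]
    exact ih h.2

theorem pvGetV_append (u w : List (Int × Int)) (x : Int) :
    pvGetV x (u ++ w) = if x ∈ u.map Prod.fst then pvGetV x u else pvGetV x w := by
  induction u with
  | nil => simp
  | cons t rest ih =>
    obtain ⟨k, v⟩ := t
    by_cases hk : k = x
    · subst hk
      simp [pvGetV]
    · simp only [List.cons_append, pvGetV, if_neg hk, ih, List.map_cons, List.mem_cons]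
      by_cases hm : x ∈ rest.map Prod.fst
      · simp [hm]
      · have hxk : ¬ (x = k) := fun h => hk h.symm
        simp [hm, hxk]

theorem pvGetV_reverse (a : List (Int × Int)) (x : Int) (h : (a.map Prod.fst).Nodup) :
    pvGetV x a.reverse = pvGetV x a := by
  induction a with
  | nil => rfl
  | cons t rest ih =>
    obtain ⟨k, v⟩ := t
    simp only [List.map_cons, List.nodup_cons] at h
    have hkr : k ∉ List.map Prod.fst rest.reverse := by
      rw [List.map_reverse, List.mem_reverse]; exact h.1
    rw [List.reverse_cons, pvGetV_append]
    by_cases hk : k = x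
    · subst hk
      rw [if_neg hkr]
      simp [pvGetV]
    · by_cases hm : x ∈ List.map Prod.fst rest
      · have hmr : x ∈ List.map Prod.fst rest.reverse := by
          rw [List.map_reverse, List.mem_reverse]; exact hm
        rw [if_pos hmr, ih h.2]
        simp [pvGetV, hk]
      · have hmr : x ∉ List.map Prod.fst rest.reverse := by
          rw [List.map_reverse, List.mem_reverse]; exact hm
        rw [if_neg hmr]
        simp [pvGetV, hk, pvGetV_not_mem rest x hm]
theorem pvEraseK_not_mem (a : List (Int × Int)) (x : Int) (h : x ∉ a.map Prod.fst) :
    pvEraseK x a = a := by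
  induction a with
  | nil => rfl
  | cons t rest ih =>
    obtain ⟨k, v⟩ := t
    simp only [List.map_cons, List.mem_cons] at h
    rw [not_or] at h
    simp only [pvEraseK]
    rw [if_neg (fun hkx => h.1 hkx.symm), ih h.2]

theorem pvEraseK_append (u w : List (Int × Int)) (x : Int) :
    pvEraseK x (u ++ w) = if x ∈ u.map Prod.fst then pvEraseK x u ++ w else u ++ pvEraseK x w := by
  induction u with
  | nil => simp
  | cons t rest ih =>
    obtain ⟨k, v⟩ := t
    by_cases hk : k = x
    · subst hk
      simp [pvEraseK]
    · simp only [List.cons_append, pvEraseK, if_neg hk, ih, List.map_cons, List.mem_cons]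
      by_cases hm : x ∈ rest.map Prod.fst
      · simp [hm]
      · have hxk : ¬ (x = k) := fun h => hk h.symm
        simp [hm, hxk]

theorem pvEraseK_reverse (a : List (Int × Int)) (x : Int) (h : (a.map Prod.fst).Nodup) :
    pvEraseK x a.reverse = (pvEraseK x a).reverse := by
  induction a with
  | nil => rfl
  | cons t rest ih =>
    obtain ⟨k, v⟩ := t
    simp only [List.map_cons, List.nodup_cons] at h
    have hkr : k ∉ List.map Prod.fst rest.reverse := by
      rw [List.map_reverse, List.mem_reverse]; exact h.1
    rw [List.reverse_cons, pvEraseK_append]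
    by_cases hk : k = x
    · subst hk
      rw [if_neg hkr]
      simp [pvEraseK]
    · by_cases hm : x ∈ List.map Prod.fst rest
      · have hmr : x ∈ List.map Prod.fst rest.reverse := by
          rw [List.map_reverse, List.mem_reverse]; exact hm
        rw [if_pos hmr, ih h.2]
        simp [pvEraseK, hk]
      · have hmr : x ∉ List.map Prod.fst rest.reverse := by
          rw [List.map_reverse, List.mem_reverse]; exact hm
        rw [if_neg hmr]
        simp [pvEraseK, hk, pvEraseK_not_mem rest x hm]
theorem setfold (xs : List Int) (s t : List Int) :
    xs.foldl PySem.Set.add (s ++ t) =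
      s ++ (xs.filter (fun y => !(s.contains y))).foldl PySem.Set.add t := by
  induction xs generalizing t with
  | nil => simp
  | cons x xs ih =>
    by_cases hx : x ∈ s
    · have hadd : PySem.Set.add (s ++ t) x = s ++ t := by
        simp [PySem.Set.add, hx]
      have hf : (x :: xs).filter (fun y => !(s.contains y)) =
          xs.filter (fun y => !(s.contains y)) := by
        simp [hx]
      rw [List.foldl_cons, hadd, hf, ih]
    · have hadd : PySem.Set.add (s ++ t) x = s ++ PySem.Set.add t x := by
        by_cases htx : x ∈ t
        · simp [PySem.Set.add, hx, htx]
        · simp [PySem.Set.add, hx, htx]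
      have hf : (x :: xs).filter (fun y => !(s.contains y)) =
          x :: xs.filter (fun y => !(s.contains y)) := by
        simp [hx]
      rw [List.foldl_cons, hadd, hf, ih (PySem.Set.add t x), List.foldl_cons]
theorem ofList_cons (x : Int) (xs : List Int) :
    PySem.Set.ofList (x :: xs) = x :: PySem.Set.ofList (xs.filter (fun y => y != x)) := by
  have h0 : PySem.Set.add PySem.Set.empty x = [x] := rfl
  have h1 : ([x] : List Int) = [x] ++ [] := by simp
  simp only [PySem.Set.ofList, List.foldl_cons, h0]
  rw [h1, setfold]
  have hfc : (xs.filter (fun y => !(([x] : List Int).contains y))) =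
      xs.filter (fun y => y != x) := by
    apply List.filter_congr
    intro y _
    by_cases he : y = x <;> simp [he]
  rw [hfc]
  rfl

theorem ofList_filter (l : List Int) (p : Int → Bool) :
    (PySem.Set.ofList l).filter p = PySem.Set.ofList (l.filter p) := by
  generalize hn : l.length = n
  induction n using Nat.strong_induction_on generalizing l p with
  | _ n ih =>
    cases l with
    | nil => rfl
    | cons x xs =>
      have hlen : (xs.filter (fun y => y != x)).length < n := by
        have := List.length_filter_le (fun y => y != x) xs
        simp at hn; omega
      by_cases hp : p x
      · rw [ofList_cons, List.filter_cons, hp]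
        simp only [if_pos trivial]
        rw [ih _ hlen _ _ rfl, List.filter_cons, hp]
        simp only [if_pos trivial]
        rw [ofList_cons]
        congr 2
        rw [List.filter_filter, List.filter_filter]
        apply List.filter_congr
        intro y _
        rw [Bool.and_comm]
      · rw [ofList_cons, List.filter_cons]
        simp only [hp, Bool.false_eq_true, if_false, List.filter_cons]
        rw [ih _ hlen _ _ rfl]
        congr 1
        rw [List.filter_filter]
        apply List.filter_congr
        intro y _
        by_cases hpy : p y
        · have : y ≠ x := fun he => by rw [he] at hpy; exact absurd hpy (by simp [hp])
          simp [hpy, this]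
        · simp [hpy]

theorem pvF_keys (l : List Int) : (pvF l).map Prod.fst = PySem.Set.ofList l := by
  simp [pvF, List.map_map, Function.comp_def]

theorem pvF_cons (x : Int) (tl : List Int) :
    pvF (x :: tl) = (x, (tl.count x : Int) + 1) :: pvF (tl.filter (fun y => y != x)) := by
  unfold pvF
  rw [ofList_cons, List.map_cons]
  congr 1
  · simp [List.count_cons_self]
  · apply List.map_congr_left
    intro k hk
    have hkmem : k ∈ tl.filter (fun y => y != x) := (PySem.Set.mem_ofList _ _).mp hk
    have hkx : k ≠ x := by
      have := List.of_mem_filter hkmem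
      simpa using this
    have hxk : ¬ (x = k) := fun he => hkx he.symm
    have h1 : List.count k (x :: tl) = List.count k tl := by
      simp [hxk]
    have h2 : List.count k (tl.filter (fun y => y != x)) = List.count k tl :=
      List.count_filter (by simpa using hkx)
    rw [h1, h2]

theorem pvGetV_map (s : List Int) (g : Int → Int) (x : Int) (h : x ∈ s) :
    pvGetV x (s.map (fun k => (k, g k))) = g x := by
  induction s with
  | nil => simp at h
  | cons y ys ih =>
    by_cases hy : y = x
    · subst hy
      simp [pvGetV]
    · rcases List.mem_cons.mp h with he | hm
      · exact absurd he.symm hy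
      · simp only [List.map_cons, pvGetV, if_neg hy]
        exact ih hm

theorem pvEraseK_map (s : List Int) (g : Int → Int) (x : Int) :
    pvEraseK x (s.map (fun k => (k, g k))) = (s.erase x).map (fun k => (k, g k)) := by
  induction s with
  | nil => rfl
  | cons y ys ih =>
    by_cases hy : y = x
    · subst hy
      simp [pvEraseK, List.erase_cons_head]
    · rw [List.map_cons]
      simp only [pvEraseK, if_neg hy]
      rw [List.erase_cons_tail (by simpa using hy), List.map_cons, ih]

theorem pvGetV_F (l : List Int) (x : Int) (h : x ∈ l) : pvGetV x (pvF l) = (l.count x : Int) := by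
  unfold pvF
  exact pvGetV_map _ _ _ ((PySem.Set.mem_ofList _ _).mpr h)

theorem pvEraseK_F (l : List Int) (x : Int) :
    pvEraseK x (pvF l) = pvF (l.filter (fun y => y != x)) := by
  unfold pvF
  rw [pvEraseK_map, (PySem.Set.nodup_ofList l).erase_eq_filter, ofList_filter]
  apply List.map_congr_left
  intro k hk
  have hkx : k ≠ x := by
    have := List.of_mem_filter ((PySem.Set.mem_ofList _ _).mp hk)
    simpa using this
  congr 1
  rw [List.count_filter (by simpa using hkx)]

theorem pvF_keys_nodup (l : List Int) : ((pvF l).map Prod.fst).Nodup := by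
  rw [pvF_keys]
  exact PySem.Set.nodup_ofList l

theorem element_counter_eq (l : List Int) : element_counter l = (pvF l).reverse := by
  induction l with
  | nil => rfl
  | cons x tl ih =>
    simp only [element_counter, ih]
    by_cases hx : x ∈ tl
    · have hkeys : x ∈ ((pvF tl).reverse.map Prod.fst) := by
        rw [List.map_reverse, List.mem_reverse, pvF_keys]
        exact (PySem.Set.mem_ofList _ _).mpr hx
      have hex : pvExistsA ((pvF tl).reverse) x = true :=
        (pvExistsA_eq_mem _ _).mpr hkeys
      rw [if_pos hex, pop_lemma _ _ hex]
      have hnd := pvF_keys_nodup tl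
      rw [pvGetV_reverse _ _ hnd, pvEraseK_reverse _ _ hnd, pvGetV_F _ _ hx, pvEraseK_F]
      rw [pvF_cons, List.reverse_cons]
    · have hkeys : x ∉ ((pvF tl).reverse.map Prod.fst) := by
        rw [List.map_reverse, List.mem_reverse, pvF_keys]
        intro hmem
        exact hx ((PySem.Set.mem_ofList _ _).mp hmem)
      have hex : pvExistsA ((pvF tl).reverse) x = false := by
        rcases hb : pvExistsA ((pvF tl).reverse) x with _ | _
        · rfl
        · exact absurd ((pvExistsA_eq_mem _ _).mp hb) hkeys
      rw [hex]
      simp only [Bool.false_eq_true, if_false]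
      rw [pvF_cons, List.reverse_cons]
      have h1 : tl.count x = 0 := List.count_eq_zero.mpr hx
      have h2 : tl.filter (fun y => y != x) = tl :=
        List.filter_eq_self.mpr (fun y hy => by
          simp only [bne_iff_ne, ne_eq]
          intro he; exact hx (he ▸ hy))
      rw [h1, h2]
      norm_num

theorem element_counter_alt_eq (l : List Int) : element_counter_alt l = (pvF l).reverse := by
  unfold element_counter_alt
  rw [PySem.Dict.foldl_insert_getD_add_one_eq_counter, PySem.Dict.items_counter]
  rfl

-- ===== VERDICT (by name: the statement is the Claim_ definition above) =====
theorem element_counter_spec : Claim_equal_element_counter := by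
  intro l _
  unfold Spec_element_counter
  rw [element_counter_eq, element_counter_alt_eq]
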